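-- pv_equiv track=rewrite | github.com/queelius/computational-explorations | src/coprime_ramsey_sat.py | find_new_coprime_cliques
-- ===== SOURCE A (Python) =====
-- from typing import List, Tuple, Dict, Optional, Set
--
-- def find_new_coprime_cliques(n: int, k: int, adj: Dict[int, Set[int]]) -> List[Tuple[int, ...]]:
--     """
--     Find all k-cliques in coprime graph on [n] that include vertex n.
--
--     These are exactly the new cliques added when going from n-1 to n.
--     We only need to find (k-1)-cliques among the coprime neighbors of n
--     that are in [1..n-1], then add n to each.
--     """
--     if k < 1:
--         return []
--     if k == 1:
--         return [(n,)]
--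
--     # Neighbors of n in [1..n-1]
--     neighbors = sorted([v for v in range(1, n) if v in adj.get(n, set())])
--
--     cliques = []
--
--     def extend(current: List[int], candidates: List[int]):
--         if len(current) == k - 1:
--             cliques.append(tuple(sorted(current + [n])))
--             return
--         needed = (k - 1) - len(current)
--         for idx, v in enumerate(candidates):
--             if len(candidates) - idx < needed:
--                 break
--             if all(v in adj[u] for u in current):
--                 new_candidates = [w for w in candidates[idx + 1:] if w in adj[v]]
--                 extend(current + [v], new_candidates)
--
--     extend([], neighbors)
--     return cliques
-- ===== SOURCE B (Python) =====
-- from typing import List, Tuple, Dict, Set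
--
--
-- def _combos(xs: List[int], r: int) -> List[Tuple[int, ...]]:
--     """All r-element combinations of xs, in lexicographic (itertools) order."""
--     if r == 0:
--         return [()]
--     if not xs:
--         return []
--     head, tail = xs[0], xs[1:]
--     with_head = [(head,) + c for c in _combos(tail, r - 1)]
--     return with_head + _combos(tail, r)
--
--
-- def _is_clique(combo: Tuple[int, ...], adj: Dict[int, Set[int]]) -> bool:
--     for i, u in enumerate(combo):
--         for v in combo[i + 1:]:
--             if v not in adj[u]:
--                 return False
--     return True
--
--
-- def find_new_coprime_cliques(n: int, k: int, adj: Dict[int, Set[int]]) -> List[Tuple[int, ...]]: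
--     if k < 1:
--         return []
--     if k == 1:
--         return [(n,)]
--     neighbors = sorted(v for v in adj.get(n, set()) if 1 <= v < n)
--     return [c + (n,) for c in _combos(neighbors, k - 1) if _is_clique(c, adj)]
-- ===== Notes on version B (the rewrite author's own statement) =====
-- stated objective: simpler
-- what changed: Replaces A's nested-closure recursive backtracking (with candidate-set pruning, an enumerate/break guard and a mutating accumulator) by a plain generate-and-test: explicitly enumerate (k-1)-combinations of the sorted neighbor list in lexicographic order and keep those that form a clique; neighbors are collected by scanning adj[n] instead of all of range(1, n).
-- outside the precondition, e.g. on find_new_coprime_cliques(3, 2, {3: {1}}): A returns [(1, 3)], B returns [(1, 3)]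
import Mathlib
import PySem

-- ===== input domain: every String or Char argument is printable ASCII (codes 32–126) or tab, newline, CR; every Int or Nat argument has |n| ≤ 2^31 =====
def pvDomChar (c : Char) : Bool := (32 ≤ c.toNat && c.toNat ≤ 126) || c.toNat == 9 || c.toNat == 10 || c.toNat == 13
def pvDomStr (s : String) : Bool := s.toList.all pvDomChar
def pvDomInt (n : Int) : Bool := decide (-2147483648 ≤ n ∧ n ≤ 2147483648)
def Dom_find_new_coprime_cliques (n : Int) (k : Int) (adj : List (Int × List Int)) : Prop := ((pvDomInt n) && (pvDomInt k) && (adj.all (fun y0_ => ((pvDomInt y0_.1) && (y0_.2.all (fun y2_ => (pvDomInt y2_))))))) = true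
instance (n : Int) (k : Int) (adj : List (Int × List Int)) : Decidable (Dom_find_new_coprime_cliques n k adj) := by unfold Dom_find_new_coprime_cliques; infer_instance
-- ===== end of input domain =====

-- B replaces A's pruned recursive backtracking (nested closure `extend`) by generate-and-test over
-- explicitly generated lexicographic combinations of the neighbor list, and scans adj[n] instead of
-- range(1, n) to collect neighbors; equivalence of return values is proved on Pre_ below.

-- ===== PORT A =====

-- adj[u] with a default: Python dict lookup (first match on the association list).
def adjGetD (adj : List (Int × List Int)) (u : Int) : List Int :=
  (PySem.Dict.mk adj).getD u []

mutual
-- the nested closure `extend(current, candidates)`; `cliques` is the accumulated result list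
def extendA (n k : Int) (adj : List (Int × List Int)) (current candidates : List Int)
    (cliques : List (List Int)) : List (List Int) :=
  if (current.length : Int) = k - 1 then
    cliques ++ [PySem.List.sorted (current ++ [n]) (fun x => x) false]
  else
    extendLoopA n k adj current (candidates.length : Int) 0 candidates cliques
termination_by (candidates.length, 1)
decreasing_by
  exact Prod.Lex.right _ (by omega)

-- the `for idx, v in enumerate(candidates)` loop with its break; rest = candidates[idx:]
def extendLoopA (n k : Int) (adj : List (Int × List Int)) (current : List Int)
    (candLen idx : Int) (rest : List Int) (cliques : List (List Int)) : List (List Int) :=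
  match rest with
  | [] => cliques
  | v :: tl =>
    if candLen - idx < (k - 1) - (current.length : Int) then cliques  -- break
    else
      let cliques' :=
        if current.all (fun u => (adjGetD adj u).contains v) then
          extendA n k adj (current ++ [v]) (tl.filter (fun w => (adjGetD adj v).contains w)) cliques
        else cliques
      extendLoopA n k adj current candLen (idx + 1) tl cliques'
termination_by (rest.length, 0)
decreasing_by
  · exact Prod.Lex.left _ _ (Nat.lt_succ_of_le (List.length_filter_le _ _))
  · exact Prod.Lex.left _ _ (Nat.lt_succ_self _)
end

def find_new_coprime_cliques (n : Int) (k : Int) (adj : List (Int × List Int)) : List (List Int) :=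
  if k < 1 then []
  else if k = 1 then [[n]]
  else
    let neighbors := PySem.List.sorted
      ((PySem.List.pyRange 1 n 1).filter (fun v => (adjGetD adj n).contains v)) (fun x => x) false
    extendA n k adj [] neighbors []

-- ===== PORT B =====

-- _combos(xs, r): all r-element combinations in lexicographic order
def combosB (xs : List Int) (r : Int) : List (List Int) :=
  if r = 0 then [[]]
  else
    match xs with
    | [] => []
    | head :: tail => (combosB tail (r - 1)).map (fun c => head :: c) ++ combosB tail r
termination_by xs.length

-- _is_clique(combo, adj): each element adjacent to all later ones
def isCliqueB (adj : List (Int × List Int)) (combo : List Int) : Bool :=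
  match combo with
  | [] => true
  | u :: rest => rest.all (fun v => (adjGetD adj u).contains v) && isCliqueB adj rest

def find_new_coprime_cliques_alt (n : Int) (k : Int) (adj : List (Int × List Int)) : List (List Int) :=
  if k < 1 then []
  else if k = 1 then [[n]]
  else
    let neighbors := PySem.List.sorted
      ((adjGetD adj n).filter (fun v => 1 ≤ v && v < n)) (fun x => x) false
    ((combosB neighbors (k - 1)).filter (fun c => isCliqueB adj c)).map (fun c => c ++ [n])

-- ===== PRECONDITION & SPEC =====
-- Pre_ excludes (for k ≥ 2 only) inputs where the value list at key n has duplicates — a Python set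
-- is represented by a duplicate-free list, so those encode no Python input — and inputs where some
-- in-range neighbor of n is not itself a key of adj: there Python A (and B) can raise KeyError on
-- adj[u], and where A happens to return without touching the missing key both programs agree anyway.
def Pre_find_new_coprime_cliques (n : Int) (k : Int) (adj : List (Int × List Int)) : Prop :=
  1 < k →
    (adjGetD adj n).Nodup ∧
    ∀ v ∈ adjGetD adj n, 1 ≤ v → v < n → (PySem.Dict.mk adj).contains v = true
instance (n : Int) (k : Int) (adj : List (Int × List Int)) :
    Decidable (Pre_find_new_coprime_cliques n k adj) := by
  unfold Pre_find_new_coprime_cliques; infer_instance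

def pvWitness_find_new_coprime_cliques : Int × Int × (List (Int × List Int)) :=
  (4, 2, [(4, [1, 3]), (1, [2, 3, 4]), (3, [1, 2, 4])])

def Spec_find_new_coprime_cliques (n : Int) (k : Int) (adj : List (Int × List Int)) (out : List (List Int)) : Prop := out = find_new_coprime_cliques_alt n k adj
instance (n : Int) (k : Int) (adj : List (Int × List Int)) (out : List (List Int)) : Decidable (Spec_find_new_coprime_cliques n k adj out) := by unfold Spec_find_new_coprime_cliques; infer_instance

-- ===== CLAIM (what is proved, stated in full; the proofs are below) =====
def Claim_equal_find_new_coprime_cliques : Prop := ∀ (n : Int) (k : Int) (adj : List (Int × List Int)), Dom_find_new_coprime_cliques n k adj → Pre_find_new_coprime_cliques n k adj → Spec_find_new_coprime_cliques n k adj (find_new_coprime_cliques n k adj)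

-- ===== LEMMAS AND PROOFS =====

theorem combosB_of_short (xs : List Int) : ∀ r : Int, (xs.length : Int) < r → combosB xs r = [] := by
  induction xs with
  | nil => intro r hr; unfold combosB; simp at hr; simp [Int.ne_of_gt hr]
  | cons h t ih =>
    intro r hr
    unfold combosB
    have hr0 : r ≠ 0 := by simp at hr ⊢; omega
    simp only [hr0, if_false]
    rw [ih (r - 1) (by simp at hr ⊢; omega), ih r (by simp at hr ⊢; omega)]
    simp

theorem combosB_filter (p : Int → Bool) (xs : List Int) :
    ∀ r : Int, combosB (xs.filter p) r = (combosB xs r).filter (fun c => c.all p) := by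
  induction xs with
  | nil => intro r; by_cases h : r = 0 <;> simp [combosB, h]
  | cons h t ih =>
    intro r
    by_cases hr : r = 0
    · have e : ∀ ys : List Int, combosB ys 0 = [[]] := by
        intro ys; unfold combosB; simp
      subst hr; rw [e, e]; simp
    · by_cases hp : p h
      · rw [show (h :: t).filter p = h :: t.filter p by simp [hp]]
        unfold combosB
        simp only [hr, if_false]
        rw [ih (r - 1), ih r]
        simp [List.filter_append, List.filter_map, Function.comp_def, hp]
      · rw [show (h :: t).filter p = t.filter p by simp [hp]]
        rw [ih r]
        conv_rhs => unfold combosB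
        simp only [hr, if_false]
        simp [List.filter_append, List.filter_map, Function.comp_def, hp]

theorem sublist_of_mem_combosB (xs : List Int) :
    ∀ r c, c ∈ combosB xs r → c.Sublist xs := by
  induction xs with
  | nil => intro r c hc; unfold combosB at hc; by_cases h : r = 0 <;> simp [h] at hc; simp [hc]
  | cons h t ih =>
    intro r c hc
    by_cases hr : r = 0
    · unfold combosB at hc; simp [hr] at hc; simp [hc]
    · unfold combosB at hc
      simp only [hr, if_false, List.mem_append, List.mem_map] at hc
      rcases hc with ⟨c', hc', rfl⟩ | hc
      · exact (ih _ _ hc').cons₂ h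
      · exact (ih _ _ hc).cons h

theorem extendLoop_eq (n k : Int) (adj : List (Int × List Int)) (current : List Int)
    (hlt : (current.length : Int) < k - 1) :
    ∀ (rest : List Int) (candLen idx : Int) (acc : List (List Int)),
    (∀ cands' : List Int, cands'.length < rest.length →
       ∀ (cur' : List Int) (acc' : List (List Int)),
         (∀ u ∈ cur', ∀ v ∈ cands', (adjGetD adj u).contains v = true) →
         (cur'.length : Int) ≤ k - 1 →
         extendA n k adj cur' cands' acc' =
           acc' ++ ((combosB cands' ((k - 1) - (cur'.length : Int))).filter
                     (fun c => isCliqueB adj c)).map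
                   (fun c => PySem.List.sorted ((cur' ++ c) ++ [n]) (fun x => x) false)) →
    (∀ u ∈ current, ∀ v ∈ rest, (adjGetD adj u).contains v = true) →
    candLen - idx = (rest.length : Int) →
    extendLoopA n k adj current candLen idx rest acc =
      acc ++ ((combosB rest ((k - 1) - (current.length : Int))).filter
                (fun c => isCliqueB adj c)).map
              (fun c => PySem.List.sorted ((current ++ c) ++ [n]) (fun x => x) false) := by
  intro rest
  induction rest with
  | nil =>
    intro candLen idx acc _ _ _
    rw [combosB_of_short _ _ (by simpa using hlt)]
    simp [extendLoopA]
  | cons v tl ih =>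
    intro candLen idx acc IHA hinv hcl
    rw [extendLoopA]
    by_cases hbr : candLen - idx < (k - 1) - (current.length : Int)
    · rw [if_pos hbr, combosB_of_short _ _ (by rw [← hcl]; exact hbr)]
      simp
    · rw [if_neg hbr]
      have hall : (current.all fun u => (adjGetD adj u).contains v) = true := by
        rw [List.all_eq_true]
        intro u hu
        exact hinv u hu v (by simp)
      simp only [hall, if_true]
      -- the recursive extendA call
      set cands' : List Int := tl.filter (fun w => (adjGetD adj v).contains w) with hcands'
      have hlenc : cands'.length < (v :: tl).length :=
        Nat.lt_succ_of_le (List.length_filter_le _ _)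
      have hinv' : ∀ u ∈ current ++ [v], ∀ w ∈ cands', (adjGetD adj u).contains w = true := by
        intro u hu w hw
        rw [hcands', List.mem_filter] at hw
        rcases List.mem_append.1 hu with hu | hu
        · exact hinv u hu w (List.mem_cons_of_mem v hw.1)
        · simp at hu; subst hu; exact hw.2
      have hle' : ((current ++ [v]).length : Int) ≤ k - 1 := by simp; omega
      rw [IHA cands' hlenc (current ++ [v]) acc hinv' hle']
      rw [ih candLen (idx + 1) _
            (fun c h cur' acc' hi hl => IHA c (Nat.lt_succ_of_lt h) cur' acc' hi hl)
            (fun u hu w hw => hinv u hu w (by simp [hw]))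
            (by simp at hcl ⊢; omega)]
      -- algebra on the combinations side
      have hne : (k - 1) - (current.length : Int) ≠ 0 := by omega
      have hsplit : combosB (v :: tl) ((k - 1) - (current.length : Int)) =
          (combosB tl ((k - 1) - (current.length : Int) - 1)).map (fun c => v :: c) ++
          combosB tl ((k - 1) - (current.length : Int)) := by
        conv_lhs => rw [combosB]
        simp [hne]
      have hlen1 : (k - 1) - ((current ++ [v]).length : Int) =
          (k - 1) - (current.length : Int) - 1 := by simp; omega
      rw [hsplit, List.filter_append, List.map_append, List.append_assoc]
      congr 1
      have hclique : ∀ c : List Int,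
          isCliqueB adj (v :: c) = (c.all (fun w => (adjGetD adj v).contains w) && isCliqueB adj c) := by
        intro c; rw [isCliqueB]
      rw [List.filter_map]
      have : ((combosB tl ((k - 1) - (current.length : Int) - 1)).filter
                ((fun c => isCliqueB adj c) ∘ (fun c => v :: c))) =
             (combosB cands' ((k - 1) - (current.length : Int) - 1)).filter
                (fun c => isCliqueB adj c) := by
        rw [hcands', combosB_filter]
        rw [List.filter_filter]
        apply List.filter_congr
        intro c _
        simp [Function.comp, hclique c, Bool.and_comm]
      rw [this, hlen1, List.map_map]
      congr 1
      exact List.map_congr_left (fun c _ => by simp)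

theorem extendA_eq (n k : Int) (adj : List (Int × List Int)) :
    ∀ (m : Nat) (cands : List Int), cands.length ≤ m →
    ∀ (current : List Int) (acc : List (List Int)),
      (∀ u ∈ current, ∀ v ∈ cands, (adjGetD adj u).contains v = true) →
      (current.length : Int) ≤ k - 1 →
      extendA n k adj current cands acc =
        acc ++ ((combosB cands ((k - 1) - (current.length : Int))).filter
                  (fun c => isCliqueB adj c)).map
                (fun c => PySem.List.sorted ((current ++ c) ++ [n]) (fun x => x) false) := by
  intro m
  induction m using Nat.strong_induction_on with
  | _ m IH =>
    intro cands hm current acc hinv hle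
    rw [extendA]
    by_cases hbase : (current.length : Int) = k - 1
    · rw [if_pos hbase]
      have h0 : (k - 1) - (current.length : Int) = 0 := by omega
      rw [h0]
      have e : combosB cands 0 = [[]] := by unfold combosB; simp
      rw [e]
      simp [isCliqueB]
    · rw [if_neg hbase]
      have hlt : (current.length : Int) < k - 1 := by omega
      exact extendLoop_eq n k adj current hlt cands (cands.length : Int) 0 acc
        (fun cands' h cur' acc' hi hl =>
          IH cands'.length (Nat.lt_of_lt_of_le h hm) cands' le_rfl cur' acc' hi hl)
        hinv (by omega)


-- ===== VERDICT (by name: the statement is the Claim_ definition above) =====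
theorem find_new_coprime_cliques_spec : Claim_equal_find_new_coprime_cliques := by
  intro n k adj _hdom hpre
  unfold Spec_find_new_coprime_cliques find_new_coprime_cliques find_new_coprime_cliques_alt
  by_cases hk1 : k < 1
  · simp [hk1]
  · by_cases hk2 : k = 1
    · simp [hk2]
    · simp only [hk1, hk2, if_false]
      have hk : 1 < k := by omega
      obtain ⟨hnd, -⟩ := hpre hk
      set S := adjGetD adj n with hS
      set baseA := (PySem.List.pyRange 1 n 1).filter (fun v => S.contains v) with hbA
      set baseB := S.filter (fun v => 1 ≤ v && v < n) with hbB
      have hndA : baseA.Nodup := (PySem.List.nodup_pyRange_one 1 n).filter _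
      have hndB : baseB.Nodup := hnd.filter _
      have hperm : baseA.Perm baseB := by
        rw [List.perm_ext_iff_of_nodup hndA hndB]
        intro v
        simp [hbA, hbB, List.mem_filter, PySem.List.mem_pyRange_one, and_comm]
      have hNN : PySem.List.sorted baseA (fun x => x) false
               = PySem.List.sorted baseB (fun x => x) false :=
        PySem.List.sorted_eq_sorted_of_perm baseA baseB (fun x => x) (fun a b h => h) hperm
      rw [← hNN]
      set N := PySem.List.sorted baseA (fun x => x) false with hN
      have hpermN : N.Perm baseA := PySem.List.sorted_perm baseA (fun x => x) false
      have hndN : N.Nodup := hpermN.symm.nodup hndA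
      have hpwN : N.Pairwise (· < ·) := by
        have hle := PySem.List.sorted_pairwise baseA (fun x => x)
        rw [← hN] at hle
        exact (hle.and hndN).imp (fun h => lt_of_le_of_ne h.1 h.2)
      have hltn : ∀ v ∈ N, v < n := by
        intro v hv
        have := hpermN.mem_iff.1 hv
        rw [hbA, List.mem_filter] at this
        exact (PySem.List.mem_pyRange_one.1 this.1).2
      rw [extendA_eq n k adj N.length N le_rfl [] [] (by simp) (by simp; omega)]
      simp only [List.nil_append, List.length_nil, Nat.cast_zero, Int.sub_zero]
      apply List.map_congr_left
      intro c hc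
      have hsub : c.Sublist N := sublist_of_mem_combosB N _ c (List.mem_of_mem_filter hc)
      have hpwc : (c ++ [n]).Pairwise (· < ·) := by
        rw [List.pairwise_append]
        exact ⟨hpwN.sublist hsub, List.pairwise_singleton _ _,
          fun x hx y hy => by simp at hy; subst hy; exact hltn x (hsub.subset hx)⟩
      exact PySem.List.sorted_eq_of_perm_of_pairwise_lt (c ++ [n]) (c ++ [n]) (fun x => x) (List.Perm.refl _) hpwc
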